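-- pv_equiv track=rewrite | github.com/TheSuperShyy/DIN | tools/design_token_generator.py | generate_css
-- ===== SOURCE A (Python) =====
-- def generate_css(theme: dict) -> str:
--     lines = [":root {"]
--
--     for color_name, value in theme.get("colors", {}).items():
--         lines.append(f"  --color-{color_name}: {value};")
--
--     lines.append("")
--     for font_name, value in theme.get("fonts", {}).items():
--         lines.append(f"  --font-{font_name}: {value};")
--
--     lines.append("")
--     for size_name, value in theme.get("type-scale", {}).items():
--         lines.append(f"  --text-{size_name}: {value};")
--
--     lines.append("")
--     for step, value in theme.get("spacing", {}).items():
--         lines.append(f"  --space-{step}: {value};")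
--
--     lines.append("")
--     for name, value in theme.get("radius", {}).items():
--         lines.append(f"  --radius-{name}: {value};")
--
--     lines.append("")
--     for name, value in theme.get("shadows", {}).items():
--         lines.append(f"  --shadow-{name}: {value};")
--
--     lines.append("}")
--     return "\n".join(lines)
-- ===== SOURCE B (Python) =====
-- def generate_css(theme: dict) -> str:
--     SECTIONS = [("colors", "color"), ("fonts", "font"), ("type-scale", "text"),
--                 ("spacing", "space"), ("radius", "radius"), ("shadows", "shadow")]
--
--     def entries(items, prefix):
--         if not items:
--             return ""
--         (n, v) = items[0]
--         return f"\n  --{prefix}-{n}: {v};" + entries(items[1:], prefix)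
--
--     def render(specs):
--         if not specs:
--             return ""
--         (key, prefix), rest = specs[0], specs[1:]
--         tail = render(rest)
--         block = entries(list(theme.get(key, {}).items()), prefix)
--         return block + ("\n" + tail if rest else tail)
--
--     return ":root {" + render(SECTIONS) + "\n}"
-- ===== Notes on version B (the rewrite author's own statement) =====
-- stated objective: alternative
-- what changed: Replaces A's flat list-of-lines built by six unrolled loops and joined with '\n' by a recursive decomposition: a recursive entry printer renders each section to one block string and a recursive renderer assembles the sections back-to-front, inserting '\n' between blocks.
import Mathlib
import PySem

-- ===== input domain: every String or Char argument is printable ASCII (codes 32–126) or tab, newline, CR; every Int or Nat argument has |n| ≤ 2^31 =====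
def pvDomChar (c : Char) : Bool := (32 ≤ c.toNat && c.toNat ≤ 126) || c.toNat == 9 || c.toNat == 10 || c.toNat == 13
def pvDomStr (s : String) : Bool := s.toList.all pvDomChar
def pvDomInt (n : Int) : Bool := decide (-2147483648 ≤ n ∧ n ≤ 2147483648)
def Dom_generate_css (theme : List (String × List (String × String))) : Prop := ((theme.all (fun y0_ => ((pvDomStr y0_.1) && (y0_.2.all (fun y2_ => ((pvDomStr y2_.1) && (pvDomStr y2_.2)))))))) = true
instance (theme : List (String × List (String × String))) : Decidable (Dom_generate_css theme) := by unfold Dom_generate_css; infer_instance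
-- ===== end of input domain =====

-- B replaces A's flat list-of-lines + "\n".join with a recursive renderer: each
-- section is rendered to one block string by a recursive entry printer, and the
-- sections are assembled back-to-front (tail rendered first) with "\n" between
-- blocks (objective: alternative decomposition).

-- ===== PORT A =====
-- literal transliteration of A: a list of lines built by six unrolled loops, joined with "\n"
def generate_css (theme : List (String × List (String × String))) : String :=
  let d : PySem.Dict String (List (String × String)) := PySem.Dict.mk theme
  let lines : List String := [":root {"]
  let lines := (PySem.Dict.getD d "colors" []).foldl
      (fun acc p => acc ++ ["  --color-" ++ p.1 ++ ": " ++ p.2 ++ ";"]) lines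
  let lines := lines ++ [""]
  let lines := (PySem.Dict.getD d "fonts" []).foldl
      (fun acc p => acc ++ ["  --font-" ++ p.1 ++ ": " ++ p.2 ++ ";"]) lines
  let lines := lines ++ [""]
  let lines := (PySem.Dict.getD d "type-scale" []).foldl
      (fun acc p => acc ++ ["  --text-" ++ p.1 ++ ": " ++ p.2 ++ ";"]) lines
  let lines := lines ++ [""]
  let lines := (PySem.Dict.getD d "spacing" []).foldl
      (fun acc p => acc ++ ["  --space-" ++ p.1 ++ ": " ++ p.2 ++ ";"]) lines
  let lines := lines ++ [""]
  let lines := (PySem.Dict.getD d "radius" []).foldl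
      (fun acc p => acc ++ ["  --radius-" ++ p.1 ++ ": " ++ p.2 ++ ";"]) lines
  let lines := lines ++ [""]
  let lines := (PySem.Dict.getD d "shadows" []).foldl
      (fun acc p => acc ++ ["  --shadow-" ++ p.1 ++ ": " ++ p.2 ++ ";"]) lines
  let lines := lines ++ ["}"]
  PySem.Str.join "\n" lines

-- ===== PORT B =====
-- Source B's SECTIONS table
def pvSections : List (String × String) :=
  [("colors", "color"), ("fonts", "font"), ("type-scale", "text"),
   ("spacing", "space"), ("radius", "radius"), ("shadows", "shadow")]

-- Source B's recursive `entries`: one section's block string (built on List Char, exact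
-- for Python string concatenation per PySem's Chars convention)
def pvEntries (items : List (String × String)) (pre : String) : List Char :=
  match items with
  | [] => []
  | (n, v) :: rest =>
      ("\n  --" ++ pre ++ "-" ++ n ++ ": " ++ v ++ ";").toList ++ pvEntries rest pre

-- Source B's recursive `render`: tail first, "\n" between blocks
def pvRender (d : PySem.Dict String (List (String × String))) :
    List (String × String) → List Char
  | [] => []
  | (key, pre) :: rest =>
      let tail := pvRender d rest
      let block := pvEntries (PySem.Dict.getD d key []) pre
      block ++ (if rest ≠ [] then '\n' :: tail else tail)

-- literal transliteration of Source B
def generate_css_alt (theme : List (String × List (String × String))) : String :=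
  let d : PySem.Dict String (List (String × String)) := PySem.Dict.mk theme
  String.ofList (":root {".toList ++ pvRender d pvSections ++ "\n}".toList)

-- ===== PRECONDITION & SPEC =====
def Spec_generate_css (theme : List (String × List (String × String))) (out : String) : Prop := out = generate_css_alt theme
instance (theme : List (String × List (String × String))) (out : String) : Decidable (Spec_generate_css theme out) := by unfold Spec_generate_css; infer_instance

-- ===== CLAIM (what is proved, stated in full; the proofs are below) =====
def Claim_equal_generate_css : Prop := ∀ (theme : List (String × List (String × String))), Dom_generate_css theme → Spec_generate_css theme (generate_css theme)

-- ===== LEMMAS AND PROOFS =====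

theorem pv_intercalate_cons (c : Char) (x : List Char) (xs : List (List Char)) :
    List.intercalate [c] (x :: xs) = x ++ xs.flatMap (fun l => c :: l) := by
  induction xs generalizing x with
  | nil => simp [List.intercalate]
  | cons y ys ih =>
      simp only [List.intercalate, List.intersperse] at *
      simp [ih y]

theorem pvEntries_eq_flatMap (items : List (String × String)) (pre : String) :
    pvEntries items pre
      = items.flatMap (fun p =>
          '\n' :: ("  --" ++ pre ++ "-" ++ p.1 ++ ": " ++ p.2 ++ ";").toList) := by
  induction items with
  | nil => rfl
  | cons p rest ih =>
      cases p
      simp only [pvEntries, ih, List.flatMap_cons]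
      simp

theorem generate_css_spec' (theme : List (String × List (String × String))) :
    generate_css theme = generate_css_alt theme := by
  have h1 : "  --color-".toList = "  --".toList ++ "color".toList ++ "-".toList := by decide
  have h2 : "  --font-".toList = "  --".toList ++ "font".toList ++ "-".toList := by decide
  have h3 : "  --text-".toList = "  --".toList ++ "text".toList ++ "-".toList := by decide
  have h4 : "  --space-".toList = "  --".toList ++ "space".toList ++ "-".toList := by decide
  have h5 : "  --radius-".toList = "  --".toList ++ "radius".toList ++ "-".toList := by decide
  have h6 : "  --shadow-".toList = "  --".toList ++ "shadow".toList ++ "-".toList := by decide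
  simp only [generate_css, generate_css_alt, pvSections, pvRender, pvEntries_eq_flatMap,
    PySem.Str.join, PySem.Chars.join,
    PySem.List.foldl_append_singleton_eq_map]
  simp [List.map_append, pv_intercalate_cons, List.flatMap_append, List.flatMap_map,
    Function.comp, h1, h2, h3, h4, h5, h6]

-- ===== VERDICT (by name: the statement is the Claim_ definition above) =====
theorem generate_css_spec : Claim_equal_generate_css := by
  intro theme _
  exact generate_css_spec' theme
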